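-- pv_equiv track=rewrite | github.com/jamesmilliman/advent_of_code_2020 | src/4/4.py | parse_numeric_and_suffix
-- ===== SOURCE A (Python) =====
-- zero_ord = ord("0")
--
-- nine_ord = ord("9")
--
-- def parse_numeric_and_suffix(s):
--     numeric = None
--     suffix = ""
--
--     i = 0
--     while i < len(s):
--         o = ord(s[i])
--         if o >= zero_ord and o <= nine_ord:
--             if numeric is None:
--                 numeric = o - zero_ord
--             else:
--                 numeric *= 10
--                 numeric += o - zero_ord
--         else:
--             break
--
--         i += 1
--
--     assert numeric is not None
--     return numeric, s[i:]
-- ===== SOURCE B (Python) =====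
-- def parse_numeric_and_suffix(s):
--     i = next((j for j, c in enumerate(s) if not ("0" <= c <= "9")), len(s))
--     assert i > 0
--     return int(s[:i]), s[i:]
-- ===== Notes on version B (the rewrite author's own statement) =====
-- stated objective: simpler
-- what changed: B finds the digit-run boundary in one scan and converts with int() on the prefix slice, instead of A's fused while-loop with an Optional accumulator doing Horner accumulation in place.
import Mathlib
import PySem

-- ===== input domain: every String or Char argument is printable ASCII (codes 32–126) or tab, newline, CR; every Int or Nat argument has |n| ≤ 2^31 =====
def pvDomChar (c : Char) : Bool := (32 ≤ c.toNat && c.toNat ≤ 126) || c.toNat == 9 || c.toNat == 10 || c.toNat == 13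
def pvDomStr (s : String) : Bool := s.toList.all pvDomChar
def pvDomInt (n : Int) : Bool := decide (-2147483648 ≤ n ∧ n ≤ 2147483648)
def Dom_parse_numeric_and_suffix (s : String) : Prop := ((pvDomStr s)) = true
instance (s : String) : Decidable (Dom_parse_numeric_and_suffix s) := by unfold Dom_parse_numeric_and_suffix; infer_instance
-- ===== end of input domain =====

-- B splits boundary-finding (one scan) from integer conversion on the prefix, instead of A's
-- fused while-loop with an Optional Horner accumulator; objective: simpler. Proof of return-value
-- equivalence on Pre_ (leading character is an ASCII digit; elsewhere both raise AssertionError).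

-- ===== PORT A =====
def zero_ord : Int := 48    -- ord("0")
def nine_ord : Int := 57    -- ord("9")

-- A's while-loop: state = (numeric : Option Int), scanning left to right, break at first non-digit
def pvGoA : List Char → Option Int → Option Int × List Char
  | [], numeric => (numeric, [])
  | c :: rest, numeric =>
    let o : Int := (c.toNat : Int)
    if zero_ord ≤ o ∧ o ≤ nine_ord then
      pvGoA rest (some (match numeric with
        | none => o - zero_ord
        | some n => n * 10 + (o - zero_ord)))
    else (numeric, c :: rest)

def parse_numeric_and_suffix (s : String) : Int × String :=
  match pvGoA s.toList none with
  | (some numeric, rest) => (numeric, String.mk rest)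
  | (none, rest) => (0, String.mk rest)   -- Python: AssertionError; excluded by Pre_

-- ===== PORT B =====
def parse_numeric_and_suffix_alt (s : String) : Int × String :=
  let cs := s.toList
  -- i = next((j for j, c in enumerate(s) if not ("0" <= c <= "9")), len(s))
  let i := (cs.findIdx? (fun c => !('0' ≤ c && c ≤ '9'))).getD cs.length
  -- int(s[:i]) ported by hand as the decimal fold: exact, since every call B makes passes a
  -- nonempty all-digit prefix (assert i > 0; Python raises there, excluded by Pre_)
  ((cs.take i).foldl (fun n c => n * 10 + ((c.toNat : Int) - 48)) 0, String.mk (cs.drop i))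

-- ===== PRECONDITION & SPEC =====
-- Pre_: the first character exists and is an ASCII digit — exactly where Python A returns
-- (otherwise A's `assert numeric is not None` raises AssertionError, as does B's `assert i > 0`).
def Pre_parse_numeric_and_suffix (s : String) : Prop :=
  '0' ≤ s.toList.headD ' ' ∧ s.toList.headD ' ' ≤ '9'
instance (s : String) : Decidable (Pre_parse_numeric_and_suffix s) := by
  unfold Pre_parse_numeric_and_suffix; infer_instance

def pvWitness_parse_numeric_and_suffix : String := "123abc"

def Spec_parse_numeric_and_suffix (s : String) (out : Int × String) : Prop :=
  out = parse_numeric_and_suffix_alt s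
instance (s : String) (out : Int × String) : Decidable (Spec_parse_numeric_and_suffix s out) := by
  unfold Spec_parse_numeric_and_suffix; infer_instance

-- ===== CLAIM (what is proved, stated in full; the proofs are below) =====
def Claim_equal_parse_numeric_and_suffix : Prop :=
  ∀ (s : String), Dom_parse_numeric_and_suffix s → Pre_parse_numeric_and_suffix s →
    Spec_parse_numeric_and_suffix s (parse_numeric_and_suffix s)

-- ===== LEMMAS AND PROOFS =====

-- the two digit tests agree
theorem pv_digit_iff (c : Char) :
    ('0' ≤ c && c ≤ '9') = true ↔ (zero_ord ≤ (c.toNat : Int) ∧ (c.toNat : Int) ≤ nine_ord) := by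
  simp only [Bool.and_eq_true, decide_eq_true_eq, zero_ord, nine_ord, Char.le_def,
    UInt32.le_iff_toNat_le]
  constructor
  · rintro ⟨h1, h2⟩
    constructor <;> [exact_mod_cast h1; exact_mod_cast h2]
  · rintro ⟨h1, h2⟩
    constructor <;> [exact_mod_cast h1; exact_mod_cast h2]

theorem pv_idx_eq (p : Char → Bool) :
    ∀ (cs : List Char),
      ((cs.findIdx? (fun c => !p c)).getD cs.length) = (cs.takeWhile p).length := by
  intro cs
  induction cs with
  | nil => rfl
  | cons a l ih =>
    cases hp : p a with
    | false => simp [List.findIdx?_cons, hp, List.takeWhile_cons]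
    | true =>
      have hcond : (!p a) = false := by simp [hp]
      cases h : l.findIdx? (fun c => !p c) with
      | none =>
        simp [List.findIdx?_cons, hcond, h, List.takeWhile_cons, hp] at ih ⊢
        try omega
      | some k =>
        simp [List.findIdx?_cons, hcond, h, List.takeWhile_cons, hp] at ih ⊢
        try omega

theorem pv_take_tw (p : Char → Bool) :
    ∀ (cs : List Char), cs.take (cs.takeWhile p).length = cs.takeWhile p := by
  intro cs
  induction cs with
  | nil => rfl
  | cons a l ih =>
    cases hp : p a with
    | false => simp [List.takeWhile_cons, hp]
    | true => simp [List.takeWhile_cons, hp, ih]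

theorem pv_drop_tw (p : Char → Bool) :
    ∀ (cs : List Char), cs.drop (cs.takeWhile p).length = cs.dropWhile p := by
  intro cs
  induction cs with
  | nil => rfl
  | cons a l ih =>
    cases hp : p a with
    | false => simp [List.takeWhile_cons, List.dropWhile_cons, hp]
    | true => simp [List.takeWhile_cons, List.dropWhile_cons, hp, ih]

-- A's loop, once the accumulator is some acc, computes the Horner fold over the digit prefix
theorem pv_goA_some :
    ∀ (cs : List Char) (acc : Int),
      pvGoA cs (some acc) =
        (some ((cs.takeWhile (fun c => '0' ≤ c && c ≤ '9')).foldl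
            (fun n c => n * 10 + ((c.toNat : Int) - 48)) acc),
          cs.dropWhile (fun c => '0' ≤ c && c ≤ '9')) := by
  intro cs
  induction cs with
  | nil => intro acc; rfl
  | cons c l ih =>
    intro acc
    by_cases h : ('0' ≤ c && c ≤ '9') = true
    · rw [pvGoA, if_pos ((pv_digit_iff c).mp h)]
      simp only [List.takeWhile_cons, h, if_pos, List.dropWhile_cons, List.foldl_cons]
      exact ih _
    · rw [pvGoA, if_neg (fun hc => h ((pv_digit_iff c).mpr hc))]
      simp [List.takeWhile_cons, List.dropWhile_cons, h]

-- ===== VERDICT (by name: the statement is the Claim_ definition above) =====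
theorem parse_numeric_and_suffix_spec : Claim_equal_parse_numeric_and_suffix := by
  intro s _hDom hPre
  unfold Spec_parse_numeric_and_suffix
  unfold Pre_parse_numeric_and_suffix at hPre
  cases hcs : s.toList with
  | nil => rw [hcs] at hPre; exact absurd hPre (by decide)
  | cons c rest =>
    rw [hcs] at hPre
    simp only [List.headD_cons] at hPre
    have hd : ('0' ≤ c && c ≤ '9') = true := by
      simp [hPre.1, hPre.2]
    -- evaluate port A
    have hA : parse_numeric_and_suffix s =
        (((rest.takeWhile (fun c => '0' ≤ c && c ≤ '9')).foldl
            (fun n c => n * 10 + ((c.toNat : Int) - 48)) ((c.toNat : Int) - 48)),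
          String.mk (rest.dropWhile (fun c => '0' ≤ c && c ≤ '9'))) := by
      unfold parse_numeric_and_suffix
      rw [hcs, pvGoA, if_pos ((pv_digit_iff c).mp hd)]
      rw [pv_goA_some]
      rfl
    -- evaluate port B
    have hB : parse_numeric_and_suffix_alt s =
        (((rest.takeWhile (fun c => '0' ≤ c && c ≤ '9')).foldl
            (fun n c => n * 10 + ((c.toNat : Int) - 48)) ((c.toNat : Int) - 48)),
          String.mk (rest.dropWhile (fun c => '0' ≤ c && c ≤ '9'))) := by
      unfold parse_numeric_and_suffix_alt
      rw [hcs]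
      simp only [pv_idx_eq, pv_take_tw, pv_drop_tw]
      rw [List.takeWhile_cons, if_pos hd, List.dropWhile_cons, if_pos hd]
      rw [List.foldl_cons]
      have : (0 : Int) * 10 + ((c.toNat : Int) - 48) = (c.toNat : Int) - 48 := by ring
      rw [this]
    rw [hA, hB]
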